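-- pv_equiv track=rewrite | github.com/Mozeel-V/nebula-mini | src/eval/inspect_windows.py | windows_by_events
-- ===== SOURCE A (Python) =====
-- def windows_by_events(text, events_per_window=32, stride_events=None):
--     toks = text.split()
--     api_idx = [i for i,t in enumerate(toks) if t.startswith("api:")]
--     if not api_idx:
--         return windows_by_tokens(text, tokens_per_window=events_per_window*8, stride_tokens=(stride_events or events_per_window)*8)
--     starts = api_idx + [len(toks)]
--     events = [" ".join(toks[starts[i]:starts[i+1]]) for i in range(len(starts)-1)]
--     stride_events = stride_events or events_per_window
--     wins = []
--     for i in range(0, len(events), stride_events):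
--         seg = events[i:i+events_per_window]
--         if seg: wins.append(" ".join(seg))
--     return wins
--
-- def windows_by_tokens(text, tokens_per_window=256, stride_tokens=None):
--     toks = text.split()
--     stride_tokens = stride_tokens or tokens_per_window
--     wins = []
--     for i in range(0, len(toks), stride_tokens):
--         seg = toks[i:i+tokens_per_window]
--         if seg: wins.append(" ".join(seg))
--     return wins
-- ===== SOURCE B (Python) =====
-- def windows_by_tokens(text, tokens_per_window=256, stride_tokens=None):
--     toks = text.split()
--     step = stride_tokens or tokens_per_window
--     if tokens_per_window <= 0 or step <= 0:
--         return []
--     wins = []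
--     while toks:
--         wins.append(" ".join(toks[:tokens_per_window]))
--         toks = toks[step:]
--     return wins
--
-- def windows_by_events(text, events_per_window=32, stride_events=None):
--     toks = text.split()
--     api_idx = [i for i, t in enumerate(toks) if t.startswith("api:")]
--     step = stride_events or events_per_window
--     if not api_idx:
--         return windows_by_tokens(text, tokens_per_window=events_per_window * 8,
--                                  stride_tokens=step * 8)
--     if events_per_window <= 0 or step <= 0:
--         return []
--     wins = []
--     idx = api_idx
--     while idx:
--         end = idx[events_per_window] if events_per_window < len(idx) else len(toks)
--         wins.append(" ".join(toks[idx[0]:end]))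
--         idx = idx[step:]
--     return wins
-- ===== Notes on version B (the rewrite author's own statement) =====
-- stated objective: alternative
-- what changed: B never materializes A's intermediate list of per-event joined strings: it keeps only the api-token boundary indices and emits each window directly as one join of a token slice, walking the index list by suffix (while idx: ... idx = idx[step:]) instead of A's absolute-position range loop; the token fallback is restructured the same way.
-- intended difference: For events_per_window < 0 with a positive stride_events (and enough events/tokens that Python's negative slice end leaves a nonempty first window), A returns spurious windows produced by negative-slice wraparound (e.g. the join of all but the last |epw| events); B returns [], the intended result for a non-positive window size. — e.g. on windows_by_events("api:a api:b", -1, some 1): A returns ["api:a"], B returns []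
import Mathlib
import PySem

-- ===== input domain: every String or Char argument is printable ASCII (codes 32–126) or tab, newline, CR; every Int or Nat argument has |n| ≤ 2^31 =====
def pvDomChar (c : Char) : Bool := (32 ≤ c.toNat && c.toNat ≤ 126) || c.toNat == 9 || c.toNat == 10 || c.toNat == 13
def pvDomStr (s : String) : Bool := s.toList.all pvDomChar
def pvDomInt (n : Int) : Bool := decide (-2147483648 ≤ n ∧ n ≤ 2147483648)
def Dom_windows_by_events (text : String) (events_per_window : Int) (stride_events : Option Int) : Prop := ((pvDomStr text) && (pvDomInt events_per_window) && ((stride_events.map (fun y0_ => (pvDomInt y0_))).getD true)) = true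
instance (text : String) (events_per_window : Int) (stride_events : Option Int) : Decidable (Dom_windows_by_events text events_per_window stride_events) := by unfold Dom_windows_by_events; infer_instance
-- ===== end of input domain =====

-- B drops A's intermediate list of per-event joined strings: it keeps only api-token boundary
-- indices and emits each window as one direct join of a token slice, recursing on suffixes of the
-- index list instead of looping over absolute positions (objective: alternative decomposition).

-- Python's `x or y` for an optional-int x with default y (truthiness: None and 0 are falsy).
def pyOrInt (x : Option Int) (d : Int) : Int :=
  match x with
  | none => d
  | some s => if s = 0 then d else s

-- ===== PORT A =====
def windows_by_tokens (text : String) (tokens_per_window : Int) (stride_tokens : Option Int) : List String :=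
  let toks := PySem.Str.split₀ text
  let stride := pyOrInt stride_tokens tokens_per_window
  (PySem.List.pyRange 0 (toks.length : Int) stride).foldl
    (fun wins i =>
      let seg := PySem.List.slice toks (some i) (some (i + tokens_per_window))
      if seg ≠ [] then wins ++ [PySem.Str.join " " seg] else wins) []

def windows_by_events (text : String) (events_per_window : Int) (stride_events : Option Int) : List String :=
  let toks := PySem.Str.split₀ text
  let api_idx := ((PySem.List.enumerate toks).filter (fun p => PySem.Str.startswith p.2 "api:")).map (fun p => p.1)
  if api_idx = [] then
    windows_by_tokens text (events_per_window * 8) (some (pyOrInt stride_events events_per_window * 8))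
  else
    let starts := api_idx ++ [(toks.length : Int)]
    -- starts[i] / starts[i+1] are provably in range, so pyGetD is exact here
    let events := (PySem.List.pyRange 0 ((starts.length : Int) - 1) 1).map
      (fun i => PySem.Str.join " " (PySem.List.slice toks (some (PySem.List.pyGetD starts i 0)) (some (PySem.List.pyGetD starts (i + 1) 0))))
    let stride := pyOrInt stride_events events_per_window
    (PySem.List.pyRange 0 (events.length : Int) stride).foldl
      (fun wins i =>
        let seg := PySem.List.slice events (some i) (some (i + events_per_window))
        if seg ≠ [] then wins ++ [PySem.Str.join " " seg] else wins) []

-- ===== PORT B =====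
-- `while toks: wins.append(" ".join(toks[:k])); toks = toks[step:]` — step ≥ 1, passed as s' = step-1
def wchunks (k s' : Nat) : List String → List String
  | [] => []
  | t :: rest =>
      PySem.Str.join " " (List.take k (t :: rest)) :: wchunks k s' (rest.drop s')
termination_by l => l.length
decreasing_by simp only [List.length_drop, List.length_cons]; omega

def windows_by_tokens_alt (text : String) (tokens_per_window : Int) (stride_tokens : Option Int) : List String :=
  let toks := PySem.Str.split₀ text
  let step := pyOrInt stride_tokens tokens_per_window
  if tokens_per_window ≤ 0 ∨ step ≤ 0 then []
  else wchunks tokens_per_window.toNat (step.toNat - 1) toks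

-- `while idx: end = idx[k] if k < len(idx) else len(toks); wins.append(" ".join(toks[idx[0]:end])); idx = idx[step:]`
-- k ≥ 1 and step ≥ 1 are guaranteed by the caller's guard; step is passed as s' = step-1
def evWindows (toks : List String) (k s' : Nat) : List Int → List String
  | [] => []
  | j :: rest =>
      PySem.Str.join " " (PySem.List.slice toks (some j) (some (rest.getD (k - 1) (toks.length : Int))))
        :: evWindows toks k s' (rest.drop s')
termination_by l => l.length
decreasing_by simp only [List.length_drop, List.length_cons]; omega

def windows_by_events_alt (text : String) (events_per_window : Int) (stride_events : Option Int) : List String :=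
  let toks := PySem.Str.split₀ text
  let api_idx := ((PySem.List.enumerate toks).filter (fun p => PySem.Str.startswith p.2 "api:")).map (fun p => p.1)
  let step := pyOrInt stride_events events_per_window
  if api_idx = [] then
    windows_by_tokens_alt text (events_per_window * 8) (some (step * 8))
  else if events_per_window ≤ 0 ∨ step ≤ 0 then []
  else evWindows toks events_per_window.toNat (step.toNat - 1) api_idx

-- ===== PRECONDITION & SPEC =====
-- Pre_ excludes exactly the inputs where Python A raises ValueError (range() step 0):
-- the effective stride (stride_events if truthy, else events_per_window) is 0.
def Pre_windows_by_events (text : String) (events_per_window : Int) (stride_events : Option Int) : Prop :=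
  ¬ (events_per_window = 0 ∧ stride_events.getD 0 = 0)
instance (text : String) (events_per_window : Int) (stride_events : Option Int) : Decidable (Pre_windows_by_events text events_per_window stride_events) := by unfold Pre_windows_by_events; infer_instance

def pvWitness_windows_by_events : String × Int × Option Int := ("api:open x y api:read z w", 2, none)

-- number of whitespace-separated tokens of `text` that start with "api:" (used only by D_)
def pvApiCount (text : String) : Nat :=
  ((PySem.Str.split₀ text).filter (fun t => PySem.Str.startswith t "api:")).length

-- For events_per_window < 0 with a positive stride_events (and enough events/tokens that Python's
-- negative slice end leaves a nonempty first window), A returns spurious windows produced by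
-- negative-slice wraparound; B returns [], the intended result for a non-positive window size.
def D_windows_by_events (text : String) (events_per_window : Int) (stride_events : Option Int) : Prop :=
  events_per_window < 0 ∧ 0 < stride_events.getD 0 ∧
    (if pvApiCount text = 0
     then (-events_per_window) * 8 < ((PySem.Str.split₀ text).length : Int)
     else (-events_per_window) < (pvApiCount text : Int))
instance (text : String) (events_per_window : Int) (stride_events : Option Int) : Decidable (D_windows_by_events text events_per_window stride_events) := by unfold D_windows_by_events; infer_instance

def Spec_windows_by_events (text : String) (events_per_window : Int) (stride_events : Option Int) (out : List String) : Prop := ¬ D_windows_by_events text events_per_window stride_events → out = windows_by_events_alt text events_per_window stride_events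
instance (text : String) (events_per_window : Int) (stride_events : Option Int) (out : List String) : Decidable (Spec_windows_by_events text events_per_window stride_events out) := by unfold Spec_windows_by_events; infer_instance

def pvDiffWitness_windows_by_events : String × Int × Option Int := ("api:a api:b", -1, some 1)
def pvDiffWitnessOut_windows_by_events : (List String) × (List String) := (["api:a"], [])

-- ===== CLAIM (what is proved, stated in full; the proofs are below) =====
def Claim_unchanged_windows_by_events : Prop := ∀ (text : String) (events_per_window : Int) (stride_events : Option Int), Dom_windows_by_events text events_per_window stride_events → Pre_windows_by_events text events_per_window stride_events → Spec_windows_by_events text events_per_window stride_events (windows_by_events text events_per_window stride_events)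
def Claim_changed_windows_by_events : Prop := Dom_windows_by_events (pvDiffWitness_windows_by_events.1) (pvDiffWitness_windows_by_events.2.1) (pvDiffWitness_windows_by_events.2.2) ∧ Pre_windows_by_events (pvDiffWitness_windows_by_events.1) (pvDiffWitness_windows_by_events.2.1) (pvDiffWitness_windows_by_events.2.2) ∧ D_windows_by_events (pvDiffWitness_windows_by_events.1) (pvDiffWitness_windows_by_events.2.1) (pvDiffWitness_windows_by_events.2.2) ∧ windows_by_events (pvDiffWitness_windows_by_events.1) (pvDiffWitness_windows_by_events.2.1) (pvDiffWitness_windows_by_events.2.2) = pvDiffWitnessOut_windows_by_events.1 ∧ windows_by_events_alt (pvDiffWitness_windows_by_events.1) (pvDiffWitness_windows_by_events.2.1) (pvDiffWitness_windows_by_events.2.2) = pvDiffWitnessOut_windows_by_events.2 ∧ pvDiffWitnessOut_windows_by_events.1 ≠ pvDiffWitnessOut_windows_by_events.2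
def Claim_exact_windows_by_events : Prop := ∀ (text : String) (events_per_window : Int) (stride_events : Option Int), Dom_windows_by_events text events_per_window stride_events → Pre_windows_by_events text events_per_window stride_events → D_windows_by_events text events_per_window stride_events → windows_by_events text events_per_window stride_events ≠ windows_by_events_alt text events_per_window stride_events

-- ===== LEMMAS AND PROOFS =====

theorem pyRange_zero_nonpos (b s : Int) (hs : s ≤ 0) (hb : 0 ≤ b) :
    PySem.List.pyRange 0 b s = [] := by
  unfold PySem.List.pyRange
  split_ifs with h1 h2 h3 h4 <;> simp_all <;> omega

theorem pyRange_pos_nil (a b s : Int) (hs : 0 < s) (hba : b ≤ a) :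
    PySem.List.pyRange a b s = [] := by
  rw [PySem.List.pyRange_of_pos a b hs, if_neg (by omega)]
  simp

theorem pyRange_pos_cons (a b s : Int) (hs : 0 < s) (hab : a < b) :
    PySem.List.pyRange a b s = a :: PySem.List.pyRange (a + s) b s := by
  rw [PySem.List.pyRange_of_pos a b hs, PySem.List.pyRange_of_pos (a + s) b hs, if_pos hab]
  have hdiv : (b - a + s - 1) / s = (b - a - 1) / s + 1 := by
    have he : b - a + s - 1 = (b - a - 1) + 1 * s := by ring
    rw [he, Int.add_mul_ediv_right _ _ (by omega : s ≠ 0)]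
  by_cases h2 : a + s < b
  · rw [if_pos h2]
    have he : b - (a + s) + s - 1 = b - a - 1 := by ring
    have hnn : 0 ≤ (b - a - 1) / s := Int.ediv_nonneg (by omega) (by omega)
    have ht : ((b - a - 1) / s + 1).toNat = ((b - a - 1) / s).toNat + 1 := by omega
    rw [he, hdiv, ht, List.range_succ_eq_map]
    simp only [List.map_cons, List.map_map, Nat.cast_zero, mul_zero, add_zero]
    congr 1
    apply List.map_congr_left
    intro k _
    simp [Function.comp]
    push_cast
    ring
  · rw [if_neg h2]
    have h0 : (b - a - 1) / s = 0 := Int.ediv_eq_zero_of_lt (by omega) (by omega)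
    rw [hdiv, h0]
    norm_num

theorem foldl_id {α β : Type} (f : β → α → β) :
    ∀ (l : List α) (acc : β), (∀ acc' x, x ∈ l → f acc' x = acc') → l.foldl f acc = acc := by
  intro l
  induction l with
  | nil => intro acc _; rfl
  | cons x t ih =>
    intro acc h
    rw [List.foldl_cons, h acc x (by simp), ih acc (fun a y hy => h a y (by simp [hy]))]

theorem foldl_grow_ne_nil {α β : Type} (c : α → Prop) [DecidablePred c] (g : α → β) :
    ∀ (l : List α) (acc : List β), acc ≠ [] →
      l.foldl (fun w i => if c i then w ++ [g i] else w) acc ≠ [] := by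
  intro l
  induction l with
  | nil => intro acc h; exact h
  | cons x t ih =>
    intro acc h
    rw [List.foldl_cons]
    by_cases hc : c x
    · exact ih _ (by simp [hc])
    · exact ih _ (by simp [hc, h])

theorem slice_empty_of_nonpos {α : Type} (xs : List α) (i w : Int) (h0 : 0 ≤ i)
    (hw : w ≤ 0) (hcase : (xs.length : Int) + w ≤ 0 ∨ w = 0) :
    PySem.List.slice xs (some i) (some (i + w)) = [] := by
  apply List.eq_nil_of_length_eq_zero
  rw [PySem.List.length_slice]
  unfold PySem.List.clampIdx
  split_ifs <;> omega

theorem clampIdx_eq_toNat (n : Nat) (q : Int) (h0 : 0 ≤ q) (hn : q ≤ (n : Int)) :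
    PySem.List.clampIdx n q = q.toNat := by
  unfold PySem.List.clampIdx
  split_ifs <;> omega

theorem slice_map {α β : Type} (f : α → β) (xs : List α) (a b : Option Int) :
    PySem.List.slice (xs.map f) a b = (PySem.List.slice xs a b).map f := by
  cases a <;> cases b <;> simp [PySem.List.slice, List.map_take, List.map_drop]

theorem take_range' : ∀ (m t s : Nat), List.take t (List.range' s m) = List.range' s (min t m) := by
  intro m
  induction m with
  | zero => intro t s; simp
  | succ m ih =>
    intro t s
    cases t with
    | zero => simp
    | succ t =>
      rw [List.range'_succ, List.take_succ_cons, ih, Nat.succ_min_succ, List.range'_succ]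

theorem slice_split {α : Type} (xs : List α) (p q r : Int)
    (hp : 0 ≤ p) (hpq : p ≤ q) (hqr : q ≤ r) :
    PySem.List.slice xs (some p) (some r)
      = PySem.List.slice xs (some p) (some q) ++ PySem.List.slice xs (some q) (some r) := by
  rw [PySem.List.slice_toNat xs hp (by omega), PySem.List.slice_toNat xs hp (by omega),
      PySem.List.slice_toNat xs (by omega : (0:Int) ≤ q) (by omega)]
  have h1 : r.toNat - p.toNat = (q.toNat - p.toNat) + (r.toNat - q.toNat) := by omega
  rw [h1, List.take_add]
  have h2 : List.drop (q.toNat - p.toNat) (List.drop p.toNat xs) = List.drop q.toNat xs := by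
    rw [List.drop_drop]
    congr 1
    omega
  rw [h2]

theorem slice_ne_nil {α : Type} (xs : List α) (p q : Int)
    (h0 : 0 ≤ p) (hpq : p < q) (hq : q ≤ (xs.length : Int)) :
    PySem.List.slice xs (some p) (some q) ≠ [] := by
  have h := PySem.List.length_slice xs p q
  intro hc
  rw [hc] at h
  rw [clampIdx_eq_toNat _ _ (by omega) hq, clampIdx_eq_toNat _ _ h0 (by omega)] at h
  simp at h
  omega

theorem intercalate_cons_ne (sp x : List Char) (ys : List (List Char)) (h : ys ≠ []) :
    List.intercalate sp (x :: ys) = x ++ sp ++ List.intercalate sp ys := by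
  cases ys with
  | nil => simp at h
  | cons y t => simp [List.intercalate, List.append_assoc]

theorem intercalate_append_ne (sp : List Char) : ∀ (l1 l2 : List (List Char)), l1 ≠ [] → l2 ≠ [] →
    List.intercalate sp (l1 ++ l2) = List.intercalate sp l1 ++ sp ++ List.intercalate sp l2 := by
  intro l1
  induction l1 with
  | nil => intro l2 h; simp at h
  | cons x t ih =>
    intro l2 _ h2
    cases t with
    | nil =>
      rw [List.singleton_append, intercalate_cons_ne sp x l2 h2]
      simp [List.intercalate]
    | cons y u =>
      rw [List.cons_append, intercalate_cons_ne sp x _ (by simp),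
          intercalate_cons_ne sp x (y :: u) (by simp), ih l2 (by simp) h2]
      simp [List.append_assoc]

-- joining per-event joins equals joining the whole token slice
theorem join_chain (T : List (List Char)) (sp : List Char) (sD : Nat → Int) (n : Nat)
    (hub : ∀ k, k ≤ n → 0 ≤ sD k ∧ sD k ≤ (T.length : Int))
    (hmono : ∀ k, k < n → sD k < sD (k + 1)) :
    ∀ (m a : Nat), a + m ≤ n →
      List.intercalate sp ((List.range' a m).map
          (fun k => List.intercalate sp (PySem.List.slice T (some (sD k)) (some (sD (k + 1))))))
        = List.intercalate sp (PySem.List.slice T (some (sD a)) (some (sD (a + m)))) := by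
  have hlt : ∀ (d a : Nat), a + d + 1 ≤ n → sD a < sD (a + d + 1) := by
    intro d
    induction d with
    | zero => intro a h; simpa using hmono a (by omega)
    | succ d ih =>
      intro a h
      have h1 := ih a (by omega)
      have h2 := hmono (a + d + 1) (by omega)
      have e : a + (d + 1) + 1 = a + d + 1 + 1 := by omega
      rw [e]
      omega
  intro m
  induction m with
  | zero =>
    intro a ha
    have h0 := (hub a (by omega)).1
    simp [PySem.List.slice_toNat T h0 h0]
  | succ m ih =>
    intro a ha
    cases m with
    | zero =>
      simp [List.intercalate]
    | succ m =>
      rw [List.range'_succ, List.map_cons]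
      rw [intercalate_cons_ne _ _ _ (by simp [List.range'])]
      rw [ih (a + 1) (by omega)]
      have hsplit : PySem.List.slice T (some (sD a)) (some (sD (a + (m + 1 + 1))))
          = PySem.List.slice T (some (sD a)) (some (sD (a + 1)))
            ++ PySem.List.slice T (some (sD (a + 1))) (some (sD (a + 1 + (m + 1)))) := by
        have e : a + (m + 1 + 1) = a + 1 + (m + 1) := by omega
        rw [e]
        exact slice_split T _ _ _ (hub a (by omega)).1
          (le_of_lt (hmono a (by omega)))
          (le_of_lt (hlt m (a + 1) (by omega)))
      rw [hsplit]
      rw [intercalate_append_ne]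
      · exact slice_ne_nil T _ _ (hub a (by omega)).1 (hmono a (by omega)) (hub (a + 1) (by omega)).2
      · exact slice_ne_nil T _ _ (hub (a + 1) (by omega)).1 (hlt m (a + 1) (by omega))
          (hub (a + 1 + (m + 1)) (by omega)).2

theorem slice_eq_take_drop {α : Type} (xs : List α) (i b : Int) (h0 : 0 ≤ i) (hle : i.toNat ≤ xs.length) :
    PySem.List.slice xs (some i) (some b)
      = List.take (PySem.List.clampIdx xs.length b - i.toNat) (List.drop i.toNat xs) := by
  have hc : PySem.List.clampIdx xs.length i = i.toNat := by
    unfold PySem.List.clampIdx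
    split_ifs <;> omega
  simp [PySem.List.slice, hc]

theorem join_chain_str (toks : List String) (sD : Nat → Int) (n : Nat)
    (hub : ∀ k, k ≤ n → 0 ≤ sD k ∧ sD k ≤ (toks.length : Int))
    (hmono : ∀ k, k < n → sD k < sD (k + 1)) (m a : Nat) (h : a + m ≤ n) :
    PySem.Str.join " " ((List.range' a m).map
        (fun k => PySem.Str.join " " (PySem.List.slice toks (some (sD k)) (some (sD (k + 1))))))
      = PySem.Str.join " " (PySem.List.slice toks (some (sD a)) (some (sD (a + m)))) := by
  have hT : ((toks.map String.toList).length : Int) = (toks.length : Int) := by simp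
  have key := join_chain (toks.map String.toList) " ".toList sD n
    (by intro k hk; rw [hT]; exact hub k hk) hmono m a h
  simp only [PySem.Str.join, PySem.Chars.join]
  congr 1
  rw [List.map_map, ← slice_map String.toList toks (some (sD a)) (some (sD (a + m))), ← key]
  congr 1
  apply List.map_congr_left
  intro k _
  simp [← slice_map String.toList]

theorem pyOrInt_ne (se : Option Int) (epw : Int)
    (hpre : ¬ (epw = 0 ∧ se.getD 0 = 0)) : pyOrInt se epw ≠ 0 := by
  cases se with
  | none => simp [pyOrInt]; simp at hpre; exact hpre
  | some s =>
    simp [pyOrInt]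
    by_cases hs : s = 0 <;> simp [hs] <;> simp [hs] at hpre <;> tauto

theorem pyOrInt_pos_getD (se : Option Int) (epw : Int)
    (hneg : epw < 0) (hpos : 0 < pyOrInt se epw) : 0 < se.getD 0 := by
  cases se with
  | none => simp [pyOrInt] at hpos; omega
  | some s =>
    simp [pyOrInt] at hpos ⊢
    by_cases hs : s = 0 <;> simp [hs] at hpos <;> omega

-- count of api-tokens: the enumerate/filter/map pipeline has the same length as a plain filter
theorem enum_filter_length (q : String → Bool) :
    ∀ (l : List String) (s : Int),
      ((PySem.List.enumerate l s).filter (fun p => q p.2)).length = (l.filter q).length := by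
  intro l
  induction l with
  | nil => intro s; simp [PySem.List.enumerate]
  | cons x t ih =>
    intro s
    rw [PySem.List.enumerate_cons]
    by_cases hq : q x <;> simp [List.filter_cons, hq, ih]

-- the monotone in-range boundary sequence backing both programs: hub / hmono
theorem starts_hub (toks : List String) (xs : List Int)
    (hmemb : ∀ x ∈ xs, 0 ≤ x ∧ x < (toks.length : Int)) :
    ∀ k, k ≤ xs.length → 0 ≤ (xs ++ [(toks.length : Int)]).getD k 0 ∧
      (xs ++ [(toks.length : Int)]).getD k 0 ≤ (toks.length : Int) := by
  intro k hk
  rcases lt_or_eq_of_le hk with h | h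
  · rw [List.getD_append _ _ _ k h, List.getD_eq_getElem xs 0 h]
    have hm := hmemb _ (xs.getElem_mem h)
    exact ⟨hm.1, le_of_lt hm.2⟩
  · subst h
    rw [List.getD_append_right _ _ _ xs.length (le_refl _)]
    simp

theorem starts_mono (toks : List String) (xs : List Int)
    (hpair : xs.Pairwise (· < ·))
    (hmemb : ∀ x ∈ xs, 0 ≤ x ∧ x < (toks.length : Int)) :
    ∀ k, k < xs.length → (xs ++ [(toks.length : Int)]).getD k 0 <
      (xs ++ [(toks.length : Int)]).getD (k + 1) 0 := by
  intro k hk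
  have hsDn : (xs ++ [(toks.length : Int)]).getD xs.length 0 = (toks.length : Int) := by
    rw [List.getD_append_right _ _ _ xs.length (le_refl _)]
    simp
  rcases lt_or_eq_of_le (Nat.succ_le_of_lt hk) with h | h
  · rw [List.getD_append _ _ _ k hk, List.getD_append _ _ _ (k + 1) h,
        List.getD_eq_getElem xs 0 hk, List.getD_eq_getElem xs 0 h]
    exact List.pairwise_iff_getElem.mp hpair k (k + 1) hk h (by omega)
  · have h' : k + 1 = xs.length := by omega
    rw [List.getD_append _ _ _ k hk, List.getD_eq_getElem xs 0 hk, h', hsDn]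
    exact (hmemb _ (xs.getElem_mem hk)).2

-- one window of A (a slice of the joined-events list) is one direct token-slice join of B
theorem win_val (toks : List String) (xs : List Int)
    (hpair : xs.Pairwise (· < ·))
    (hmemb : ∀ x ∈ xs, 0 ≤ x ∧ x < (toks.length : Int))
    (epw : Int) (hepw : 0 < epw) (iN : Nat) (hin : iN < xs.length) :
    PySem.List.slice
        ((PySem.List.pyRange 0 (xs.length : Int) 1).map
          (fun k => PySem.Str.join " "
            (PySem.List.slice toks (some (PySem.List.pyGetD (xs ++ [(toks.length : Int)]) k 0))
              (some (PySem.List.pyGetD (xs ++ [(toks.length : Int)]) (k + 1) 0)))))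
        (some (iN : Int)) (some ((iN : Int) + epw)) ≠ [] ∧
    PySem.Str.join " "
        (PySem.List.slice
          ((PySem.List.pyRange 0 (xs.length : Int) 1).map
            (fun k => PySem.Str.join " "
              (PySem.List.slice toks (some (PySem.List.pyGetD (xs ++ [(toks.length : Int)]) k 0))
                (some (PySem.List.pyGetD (xs ++ [(toks.length : Int)]) (k + 1) 0)))))
          (some (iN : Int)) (some ((iN : Int) + epw)))
      = PySem.Str.join " " (PySem.List.slice toks (some (xs.getD iN 0))
          (some ((xs.drop (iN + 1)).getD (epw.toNat - 1) (toks.length : Int)))) := by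
  have hub := starts_hub toks xs hmemb
  have hmono := starts_mono toks xs hpair hmemb
  set n := xs.length with hn
  set starts := xs ++ [(toks.length : Int)] with hstarts
  set cl := PySem.List.clampIdx n ((iN : Int) + epw) with hcl
  have hclv : cl = min (iN + epw.toNat) n := by
    rw [hcl]
    unfold PySem.List.clampIdx
    split_ifs <;> omega
  have hcl1 : iN + 1 ≤ cl := by omega
  have hcln : cl ≤ n := by omega
  have hER : PySem.List.pyRange 0 ((n : Nat) : Int) 1 = (List.range n).map (fun k : Nat => (k : Int)) := by
    rw [PySem.List.pyRange_one]
    simp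
  have hsl : PySem.List.slice
      ((PySem.List.pyRange 0 ((n : Nat) : Int) 1).map
        (fun k => PySem.Str.join " "
          (PySem.List.slice toks (some (PySem.List.pyGetD starts k 0))
            (some (PySem.List.pyGetD starts (k + 1) 0)))))
      (some (iN : Int)) (some ((iN : Int) + epw))
      = (List.range' iN (cl - iN)).map
          (fun k : Nat => PySem.Str.join " "
            (PySem.List.slice toks (some (PySem.List.pyGetD starts ((k : Nat) : Int) 0))
              (some (PySem.List.pyGetD starts (((k : Nat) : Int) + 1) 0)))) := by
    rw [hER, slice_map, slice_map,
        slice_eq_take_drop (List.range n) (iN : Int) ((iN : Int) + epw) (by positivity) (by simp; omega),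
        List.length_range, List.range_eq_range', List.drop_range']
    simp only [Nat.zero_add, Nat.mul_one, Int.toNat_natCast]
    rw [take_range']
    have hmin : min (PySem.List.clampIdx n ((iN : Int) + epw) - iN) (n - iN)
        = cl - iN := by rw [← hcl]; omega
    rw [hmin, List.map_map]
    rfl
  refine ⟨?_, ?_⟩
  · rw [hsl]
    apply List.ne_nil_of_length_pos
    simp only [List.length_map, List.length_range']
    omega
  · rw [hsl]
    have hconv : ∀ k : Nat,
        PySem.Str.join " "
          (PySem.List.slice toks (some (PySem.List.pyGetD starts ((k : Nat) : Int) 0))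
            (some (PySem.List.pyGetD starts (((k : Nat) : Int) + 1) 0)))
        = PySem.Str.join " "
          (PySem.List.slice toks (some (starts.getD k 0)) (some (starts.getD (k + 1) 0))) := by
      intro k
      have hk1 : ((k : Nat) : Int) + 1 = (((k + 1 : Nat) : Nat) : Int) := by push_cast; ring
      rw [hk1, PySem.List.pyGetD_natCast, PySem.List.pyGetD_natCast]
    have hmapc : (List.range' iN (cl - iN)).map
        (fun k : Nat => PySem.Str.join " "
          (PySem.List.slice toks (some (PySem.List.pyGetD starts ((k : Nat) : Int) 0))
            (some (PySem.List.pyGetD starts (((k : Nat) : Int) + 1) 0))))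
        = (List.range' iN (cl - iN)).map
          (fun k : Nat => PySem.Str.join " "
            (PySem.List.slice toks (some (starts.getD k 0)) (some (starts.getD (k + 1) 0)))) := by
      apply List.map_congr_left
      intro k _
      exact hconv k
    rw [hmapc]
    have hch := join_chain_str toks (fun k => starts.getD k 0) n hub hmono (cl - iN) iN (by omega)
    have hsum : iN + (cl - iN) = cl := by omega
    rw [hsum] at hch
    have hstart : starts.getD iN 0 = xs.getD iN 0 := by
      rw [hstarts]
      exact List.getD_append _ _ _ iN hin
    have hend : starts.getD cl 0 = (List.drop (iN + 1) xs).getD (epw.toNat - 1) (toks.length : Int) := by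
      have hk1 : 1 ≤ epw.toNat := by omega
      by_cases hcase : iN + epw.toNat < n
      · have hclv2 : cl = iN + epw.toNat := by omega
        rw [hclv2, hstarts, List.getD_append _ _ _ _ hcase, List.getD_eq_getElem xs 0 hcase,
            List.getD_eq_getElem _ _ (by simp [List.length_drop]; omega)]
        rw [List.getElem_drop]
        congr 1
        omega
      · have hclv2 : cl = n := by omega
        have hsDn : starts.getD n 0 = (toks.length : Int) := by
          rw [hstarts, List.getD_append_right _ _ _ xs.length (le_refl _)]
          simp
        rw [hclv2, hsDn]
        symm
        apply List.getD_eq_default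
        simp only [List.length_drop]
        omega
    rw [hch]
    simp only [hstart, hend]

-- A's absolute-position window loop is B's suffix recursion over the index list
theorem loop_eq (toks : List String) (xs : List Int)
    (hpair : xs.Pairwise (· < ·))
    (hmemb : ∀ x ∈ xs, 0 ≤ x ∧ x < (toks.length : Int))
    (epw st : Int) (hepw : 0 < epw) (hst : 0 < st) :
    ∀ (m iN : Nat), xs.length - iN ≤ m → ∀ acc,
      (PySem.List.pyRange (iN : Int) (xs.length : Int) st).foldl
        (fun wins i =>
          if PySem.List.slice
              ((PySem.List.pyRange 0 (xs.length : Int) 1).map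
                (fun k => PySem.Str.join " "
                  (PySem.List.slice toks (some (PySem.List.pyGetD (xs ++ [(toks.length : Int)]) k 0))
                    (some (PySem.List.pyGetD (xs ++ [(toks.length : Int)]) (k + 1) 0)))))
              (some i) (some (i + epw)) ≠ []
          then wins ++ [PySem.Str.join " "
              (PySem.List.slice
                ((PySem.List.pyRange 0 (xs.length : Int) 1).map
                  (fun k => PySem.Str.join " "
                    (PySem.List.slice toks (some (PySem.List.pyGetD (xs ++ [(toks.length : Int)]) k 0))
                      (some (PySem.List.pyGetD (xs ++ [(toks.length : Int)]) (k + 1) 0)))))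
                (some i) (some (i + epw)))]
          else wins) acc
      = acc ++ evWindows toks epw.toNat (st.toNat - 1) (xs.drop iN) := by
  intro m
  induction m with
  | zero =>
    intro iN hm acc
    have hge : xs.length ≤ iN := by omega
    rw [pyRange_pos_nil _ _ _ hst (by exact_mod_cast hge), List.drop_eq_nil_of_le hge]
    simp [evWindows]
  | succ m ih =>
    intro iN hm acc
    by_cases hlt : iN < xs.length
    · rw [pyRange_pos_cons _ _ _ hst (by exact_mod_cast hlt), List.foldl_cons]
      obtain ⟨hne, hval⟩ := win_val toks xs hpair hmemb epw hepw iN hlt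
      rw [if_pos hne, hval]
      have hcast : (iN : Int) + st = ((iN + st.toNat : Nat) : Int) := by push_cast; omega
      rw [hcast, ih (iN + st.toNat) (by omega)]
      rw [List.drop_eq_getElem_cons hlt]
      rw [evWindows]
      have hdd : (xs.drop (iN + 1)).drop (st.toNat - 1) = xs.drop (iN + st.toNat) := by
        rw [List.drop_drop]
        congr 1
        omega
      rw [hdd]
      have hgd : xs.getD iN 0 = xs[iN] := List.getD_eq_getElem xs 0 hlt
      rw [← hgd]
      simp
    · have hge : xs.length ≤ iN := by omega
      rw [pyRange_pos_nil _ _ _ hst (by exact_mod_cast hge), List.drop_eq_nil_of_le hge]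
      simp [evWindows]

-- A's token loop is B's wchunks suffix recursion (positive window and stride)
theorem wbt_loop (toks : List String) (tpw st : Int) (htpw : 0 < tpw) (hst : 0 < st) :
    ∀ (m iN : Nat), toks.length - iN ≤ m → ∀ acc,
      (PySem.List.pyRange (iN : Int) (toks.length : Int) st).foldl
        (fun wins i =>
          if PySem.List.slice toks (some i) (some (i + tpw)) ≠ []
          then wins ++ [PySem.Str.join " " (PySem.List.slice toks (some i) (some (i + tpw)))]
          else wins) acc
      = acc ++ wchunks tpw.toNat (st.toNat - 1) (toks.drop iN) := by
  intro m
  induction m with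
  | zero =>
    intro iN hm acc
    have hge : toks.length ≤ iN := by omega
    rw [pyRange_pos_nil _ _ _ hst (by exact_mod_cast hge), List.drop_eq_nil_of_le hge]
    simp [wchunks]
  | succ m ih =>
    intro iN hm acc
    by_cases hlt : iN < toks.length
    · rw [pyRange_pos_cons _ _ _ hst (by exact_mod_cast hlt), List.foldl_cons]
      have hslice : PySem.List.slice toks (some (iN : Int)) (some ((iN : Int) + tpw))
          = List.take tpw.toNat (toks.drop iN) := by
        rw [PySem.List.slice_toNat toks (by positivity) (by omega)]
        congr 1
        omega
      have hne : PySem.List.slice toks (some (iN : Int)) (some ((iN : Int) + tpw)) ≠ [] := by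
        rw [hslice]
        have : (List.take tpw.toNat (toks.drop iN)).length = min tpw.toNat (toks.length - iN) := by
          simp [List.length_take, List.length_drop]
        intro hc
        rw [hc] at this
        simp at this
        omega
      rw [if_pos hne, hslice]
      have hcast : (iN : Int) + st = ((iN + st.toNat : Nat) : Int) := by push_cast; omega
      rw [hcast, ih (iN + st.toNat) (by omega)]
      obtain ⟨t, rest, hdrop⟩ := List.exists_cons_of_ne_nil
        (by apply List.ne_nil_of_length_pos; simp [List.length_drop]; omega :
          toks.drop iN ≠ [])
      rw [hdrop, wchunks]
      have hdd : rest.drop (st.toNat - 1) = toks.drop (iN + st.toNat) := by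
        have : rest = toks.drop (iN + 1) := by
          have := hdrop
          rw [List.drop_eq_getElem_cons hlt] at this
          exact ((List.cons.injEq _ _ _ _ ▸ this).2).symm
        rw [this, List.drop_drop]
        congr 1
        omega
      rw [hdd]
      simp
    · have hge : toks.length ≤ iN := by omega
      rw [pyRange_pos_nil _ _ _ hst (by exact_mod_cast hge), List.drop_eq_nil_of_le hge]
      simp [wchunks]

-- the fallback (no api-token) case, all stride/window sign cases
theorem wbt_case (text : String) (tpw st8 : Int) (hst8 : st8 ≠ 0)
    (hneg : tpw ≤ 0 → 0 < st8 → ((PySem.Str.split₀ text).length : Int) + tpw ≤ 0 ∨ tpw = 0) :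
    windows_by_tokens text tpw (some st8) = windows_by_tokens_alt text tpw (some st8) := by
  unfold windows_by_tokens windows_by_tokens_alt
  simp only []
  have hpy : pyOrInt (some st8) tpw = st8 := by simp [pyOrInt, hst8]
  rw [hpy]
  set toks := PySem.Str.split₀ text with htoks
  rcases lt_trichotomy st8 0 with hneg8 | hzero | hpos8
  · rw [if_pos (Or.inr (by omega)), pyRange_zero_nonpos _ _ (by omega) (by positivity)]
    rfl
  · exact absurd hzero hst8
  · by_cases htp : 0 < tpw
    · rw [if_neg (by omega)]
      have := wbt_loop toks tpw st8 htp hpos8 toks.length 0 (by omega) []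
      simpa using this
    · rw [if_pos (Or.inl (by omega))]
      apply foldl_id
      intro acc i hi
      have hmem := (PySem.List.mem_pyRange_iff_of_pos hpos8 i).mp hi
      rw [if_neg]
      simp only [ne_eq, not_not]
      exact slice_empty_of_nonpos toks i tpw hmem.1 (by omega) (hneg (by omega) hpos8)

-- ===== VERDICT (by name: the statements are the Claim_ definitions above) =====
theorem windows_by_events_spec : Claim_unchanged_windows_by_events := by
  intro text epw se _hdom hpre
  unfold Spec_windows_by_events
  intro hnd
  unfold Pre_windows_by_events at hpre
  unfold D_windows_by_events at hnd
  unfold windows_by_events windows_by_events_alt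
  simp only []
  set toks := PySem.Str.split₀ text with htoks
  set xs := ((PySem.List.enumerate toks).filter (fun p => PySem.Str.startswith p.2 "api:")).map (fun p => p.1) with hxs
  have hstride : pyOrInt se epw ≠ 0 := pyOrInt_ne se epw hpre
  have hcount : xs.length = pvApiCount text := by
    rw [hxs, List.length_map]
    unfold pvApiCount
    rw [← htoks]
    exact enum_filter_length (fun t => PySem.Str.startswith t "api:") toks 0
  by_cases hE : xs = []
  · rw [if_pos hE, if_pos hE]
    apply wbt_case text (epw * 8) (pyOrInt se epw * 8) (by exact mul_ne_zero hstride (by norm_num))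
    intro htp hsp
    have hc0 : pvApiCount text = 0 := by rw [← hcount, hE]; rfl
    by_cases hz : epw = 0
    · exact Or.inr (by omega)
    · left
      rw [← htoks]
      have hepwneg : epw < 0 := by
        rcases lt_trichotomy epw 0 with h | h | h
        · exact h
        · exact absurd h hz
        · omega
      have hgd : 0 < se.getD 0 := pyOrInt_pos_getD se epw hepwneg (by omega)
      by_contra hcon
      exact hnd ⟨hepwneg, hgd, by rw [if_pos hc0]; omega⟩
  · rw [if_neg hE, if_neg hE]
    set L := toks.length with hL
    set n := xs.length with hnx
    have hs1 : (((xs ++ [(L : Int)]).length : Int) - 1) = (n : Int) := by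
      simp [hnx]
    rw [hs1]
    simp only [List.length_map, PySem.List.length_pyRange_one]
    have hb : ((((n : Int) - 0).toNat : Nat) : Int) = (n : Int) := by simp
    rw [hb]
    have hpair : xs.Pairwise (· < ·) := by
      rw [hxs, List.pairwise_map]
      exact (PySem.List.pairwise_lt_enumerate toks 0).filter _
    have hmemb : ∀ x ∈ xs, 0 ≤ x ∧ x < (toks.length : Int) := by
      intro x hx
      rw [hxs] at hx
      simp only [List.mem_map, List.mem_filter] at hx
      obtain ⟨p, ⟨hpmem, -⟩, rfl⟩ := hx
      rw [PySem.List.mem_enumerate_iff] at hpmem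
      obtain ⟨k, hk, rfl⟩ := hpmem
      simp
      omega
    rcases lt_trichotomy (pyOrInt se epw) 0 with hneg | hzero | hpos
    · rw [if_pos (Or.inr (by omega : pyOrInt se epw ≤ 0)),
          pyRange_zero_nonpos ((n : Nat) : Int) (pyOrInt se epw) (by omega) (by positivity)]
      rfl
    · exact absurd hzero hstride
    · by_cases hepw : 0 < epw
      · rw [if_neg (by omega)]
        have := loop_eq toks xs hpair hmemb epw (pyOrInt se epw) hepw hpos n 0 (by omega) []
        simpa using this
      · rw [if_pos (Or.inl (by omega))]
        -- every window slice is empty: epw = 0, or n ≤ -epw (from ¬D_)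
        have hcn : pvApiCount text ≠ 0 := by
          rw [← hcount]
          simp [hnx]
          intro hc
          exact hE (List.eq_nil_of_length_eq_zero (hc ▸ rfl))
        have hcase : ((n : Int)) + epw ≤ 0 ∨ epw = 0 := by
          by_cases hz : epw = 0
          · exact Or.inr hz
          · left
            have hepwneg : epw < 0 := by omega
            have hgd : 0 < se.getD 0 := pyOrInt_pos_getD se epw hepwneg hpos
            by_contra hcon
            exact hnd ⟨hepwneg, hgd, by rw [if_neg hcn, ← hcount]; omega⟩
        apply foldl_id
        intro acc i hi
        have hmem := (PySem.List.mem_pyRange_iff_of_pos hpos i).mp hi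
        rw [if_neg]
        simp only [ne_eq, not_not]
        apply slice_empty_of_nonpos _ i epw hmem.1 (by omega)
        rcases hcase with h | h
        · left
          simp only [List.length_map, PySem.List.length_pyRange_one]
          omega
        · exact Or.inr h

theorem windows_by_events_changed : Claim_changed_windows_by_events := by
  unfold Claim_changed_windows_by_events
  decide

theorem windows_by_events_tight : Claim_exact_windows_by_events := by
  intro text epw se _hdom hpre hd
  unfold D_windows_by_events at hd
  obtain ⟨hepw, hgd, hcond⟩ := hd
  have hse : ∃ s, se = some s ∧ 0 < s := by
    cases se with
    | none => simp at hgd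
    | some s => exact ⟨s, rfl, by simpa using hgd⟩
  obtain ⟨s, rfl, hs⟩ := hse
  have hpy : pyOrInt (some s) epw = s := by simp [pyOrInt, show s ≠ 0 by omega]
  unfold windows_by_events windows_by_events_alt
  simp only [hpy]
  set toks := PySem.Str.split₀ text with htoks
  set xs := ((PySem.List.enumerate toks).filter (fun p => PySem.Str.startswith p.2 "api:")).map (fun p => p.1) with hxs
  have hcount : xs.length = pvApiCount text := by
    rw [hxs, List.length_map]
    unfold pvApiCount
    rw [← htoks]
    exact enum_filter_length (fun t => PySem.Str.startswith t "api:") toks 0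
  by_cases hE : xs = []
  · rw [if_pos hE, if_pos hE]
    have hc0 : pvApiCount text = 0 := by rw [← hcount, hE]; rfl
    rw [if_pos hc0] at hcond
    unfold windows_by_tokens windows_by_tokens_alt
    simp only []
    have hpy8 : pyOrInt (some (s * 8)) (epw * 8) = s * 8 := by simp [pyOrInt, show s * 8 ≠ 0 by omega]
    rw [hpy8, if_pos (Or.inl (by omega))]
    -- A's first iteration (i = 0) appends a nonempty window, so A ≠ []
    have hlen : (0 : Int) < (toks.length : Int) := by omega
    rw [pyRange_pos_cons 0 (toks.length : Int) (s * 8) (by omega) hlen, List.foldl_cons]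
    have hne : PySem.List.slice toks (some 0) (some (0 + epw * 8)) ≠ [] := by
      apply List.ne_nil_of_length_pos
      rw [PySem.List.length_slice]
      unfold PySem.List.clampIdx
      split_ifs <;> omega
    rw [if_pos hne]
    apply foldl_grow_ne_nil
    simp
  · rw [if_neg hE, if_neg hE]
    rw [if_pos (Or.inl (by omega))]
    have hcn : pvApiCount text ≠ 0 := by
      rw [← hcount]
      intro hc
      exact hE (List.eq_nil_of_length_eq_zero hc)
    rw [if_neg hcn] at hcond
    have hn : (-epw) < (xs.length : Int) := by rw [hcount]; exact hcond
    set L := toks.length with hL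
    set n := xs.length with hnx
    have hs1 : (((xs ++ [(L : Int)]).length : Int) - 1) = (n : Int) := by simp [hnx]
    rw [hs1]
    simp only [List.length_map, PySem.List.length_pyRange_one]
    have hb : ((((n : Int) - 0).toNat : Nat) : Int) = (n : Int) := by simp
    rw [hb]
    have hn0 : (0 : Int) < (n : Int) := by omega
    rw [pyRange_pos_cons 0 (n : Int) s (by omega) hn0, List.foldl_cons]
    have hlenev : ((PySem.List.pyRange 0 (n : Int) 1).map
        (fun k => PySem.Str.join " "
          (PySem.List.slice toks (some (PySem.List.pyGetD (xs ++ [(L : Int)]) k 0))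
            (some (PySem.List.pyGetD (xs ++ [(L : Int)]) (k + 1) 0))))).length = n := by
      simp [PySem.List.length_pyRange_one]
    have hne : PySem.List.slice
        ((PySem.List.pyRange 0 (n : Int) 1).map
          (fun k => PySem.Str.join " "
            (PySem.List.slice toks (some (PySem.List.pyGetD (xs ++ [(L : Int)]) k 0))
              (some (PySem.List.pyGetD (xs ++ [(L : Int)]) (k + 1) 0)))))
        (some 0) (some (0 + epw)) ≠ [] := by
      apply List.ne_nil_of_length_pos
      rw [PySem.List.length_slice, hlenev]
      unfold PySem.List.clampIdx
      split_ifs <;> omega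
    rw [if_pos hne]
    apply foldl_grow_ne_nil
    simp
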